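-- pv_equiv track=rewrite | github.com/matsoob/python-practice | random_stuff/block_with_shortest_dist.py | solve_me
-- ===== SOURCE A (Python) =====
-- from typing import Any, List
--
-- def solve_me(input: List[Any], reqs: List[str]) -> int:
--     n = len(input)
--     # [True, False, False, False, True]
--     # [0, 1, 2, 1, 0]
--     max_distances = [0] * n
--     for req in reqs:
--         req_list = [ block[req] for block in input ]
--         distance = [ None ] * n
--         since_last_seen = None
--         for i in range(n):
--             if req_list[i]:
--                 distance[i] = 0
--                 since_last_seen = 0
--             elif since_last_seen is not None:
--                 since_last_seen += 1
--                 distance[i] = since_last_seen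
--
--         since_last_seen = None
--         for i in range(n-1, -1, -1):
--             if req_list[i]:
--                 distance[i] = 0
--                 since_last_seen = 0
--             elif since_last_seen is not None:
--                 since_last_seen += 1
--                 if distance[i] is not None:
--                     distance[i] = min(distance[i], since_last_seen)
--                 else:
--                      distance[i] = since_last_seen
--
--         if None in distance:
--             return -1
--
--         for i in range(n):
--             max_distances[i] = max(distance[i], max_distances[i])
--
--     min_index = 0
--     for i in range(1, n):
--         if max_distances[min_index] > max_distances[i]:
--             min_index = i
--     return min_index
-- ===== SOURCE B (Python) =====
-- def solve_me(input, reqs):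
--     best = [0] * len(input)
--     for req in reqs:
--         pos = [i for i, block in enumerate(input) if block[req]]
--         if input and not pos:
--             return -1
--         best = [max(b, min(abs(i - p) for p in pos)) for i, b in enumerate(best)]
--     if not best:
--         return 0
--     return best.index(min(best))
-- ===== Notes on version B (the rewrite author's own statement) =====
-- stated objective: alternative
-- what changed: Per requirement B collects the list of positions of satisfying blocks and scores each block as the minimum absolute difference to those positions, then returns the first index of the minimum via min+index, instead of A's forward/backward counter sweeps over an Option-valued distance array and an explicit argmin loop.
import Mathlib
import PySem

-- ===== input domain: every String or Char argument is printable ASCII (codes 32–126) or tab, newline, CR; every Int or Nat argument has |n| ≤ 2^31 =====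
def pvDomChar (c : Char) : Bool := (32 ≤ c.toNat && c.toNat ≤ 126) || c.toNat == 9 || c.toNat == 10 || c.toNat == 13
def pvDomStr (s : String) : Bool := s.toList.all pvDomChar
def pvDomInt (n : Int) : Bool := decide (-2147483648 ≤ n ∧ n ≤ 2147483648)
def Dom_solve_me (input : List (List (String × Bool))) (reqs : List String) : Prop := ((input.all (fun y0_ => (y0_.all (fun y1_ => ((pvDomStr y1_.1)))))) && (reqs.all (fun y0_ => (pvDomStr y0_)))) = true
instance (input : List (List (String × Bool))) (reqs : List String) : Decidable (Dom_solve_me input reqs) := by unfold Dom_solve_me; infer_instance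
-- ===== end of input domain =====

-- B replaces A's forward/backward counter sweeps by per-requirement position lists and
-- per-block minimum absolute differences, and the explicit argmin loop by min+index
-- (alternative decomposition; return value only, neither mutates its arguments).

-- ===== PORT A =====

-- block[req]: first matching key (Pre_ guarantees presence; the getD false is never reached inside Pre_)
def pvLookup (block : List (String × Bool)) (req : String) : Bool :=
  ((PySem.Dict.mk block).get? req).getD false

-- first for-loop: i = 0..n-1, since_last_seen threaded left to right, distance built slot by slot
def pvFwd : List Bool → Option Int → List (Option Int)
  | [], _ => []
  | b :: rest, since =>
    if b then some 0 :: pvFwd rest (some 0)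
    else match since with
      | some s => some (s + 1) :: pvFwd rest (some (s + 1))
      | none => none :: pvFwd rest none

-- second for-loop: i = n-1..0; the pair list carries (req_list[i], distance[i] after the first loop);
-- the returned snd is since_last_seen after the leftmost processed element
def pvBwd : List (Bool × Option Int) → List (Option Int) × Option Int
  | [] => ([], none)
  | (b, d) :: rest =>
    let r := pvBwd rest
    if b then (some 0 :: r.1, some 0)
    else match r.2 with
      | some s =>
        ((match d with
          | some dv => some (min dv (s + 1))
          | none => some (s + 1)) :: r.1, some (s + 1))
      | none => (d :: r.1, none)

def pvDist (rl : List Bool) : List (Option Int) := (pvBwd (rl.zip (pvFwd rl none))).1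

-- min_index = 0; for i in range(1, n): if max_distances[min_index] > max_distances[i]: min_index = i
def pvArgmin : List Int → Int → Int → Int → Int
  | [], _, besti, _ => besti
  | v :: rest, bestv, besti, i =>
    if bestv > v then pvArgmin rest v i (i + 1) else pvArgmin rest bestv besti (i + 1)

-- the loop over reqs, with the early 'return -1'
def pvGoA (input : List (List (String × Bool))) : List String → List Int → Int
  | [], maxd =>
    match maxd with
    | [] => 0
    | v :: rest => pvArgmin rest v 0 1
  | req :: rest, maxd =>
    let rl := input.map (fun block => pvLookup block req)
    let dist := pvDist rl
    if dist.contains none then -1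
    else pvGoA input rest (List.zipWith (fun d m => max (d.getD 0) m) dist maxd)

def solve_me (input : List (List (String × Bool))) (reqs : List String) : Int :=
  pvGoA input reqs (List.replicate input.length 0)

-- ===== PORT B =====

-- pos = [i for i, block in enumerate(input) if block[req]]
def pvPosB (input : List (List (String × Bool))) (req : String) : List Int :=
  (PySem.List.enumerate input 0).filterMap
    (fun p => if pvLookup p.2 req then some p.1 else none)

-- min(abs(i - p) for p in pos); the getD 0 is never reached: pos ≠ [] whenever this is evaluated
def pvMinDist (pos : List Int) (i : Int) : Int :=
  ((PySem.List.min? (pos.map (fun p => ((i - p).natAbs : Int))) (fun x => x)).getD 0)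

def pvGoB (input : List (List (String × Bool))) : List String → List Int → Int
  | [], best =>
    if best = [] then 0
    else ((PySem.List.index? best ((PySem.List.min? best (fun x => x)).getD 0)).getD 0 : Nat)
  | req :: rest, best =>
    let pos := pvPosB input req
    if !input.isEmpty && pos.isEmpty then -1
    else pvGoB input rest
      ((PySem.List.enumerate best 0).map (fun p => max p.2 (pvMinDist pos p.1)))

def solve_me_alt (input : List (List (String × Bool))) (reqs : List String) : Int :=
  pvGoB input reqs (List.replicate input.length 0)

-- ===== PRECONDITION & SPEC =====

def pvHasKey (input : List (List (String × Bool))) (r : String) : Bool :=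
  input.all (fun block => (PySem.Dict.mk block).contains r)

def pvHasTrue (input : List (List (String × Bool))) (r : String) : Bool :=
  input.any (fun block => ((PySem.Dict.mk block).get? r).getD false)

-- exactly the inputs on which A returns normally: A raises KeyError at the first req missing from
-- some block, unless an earlier req already triggered the 'return -1' (no satisfying block)
def Pre_solve_me (input : List (List (String × Bool))) (reqs : List String) : Prop :=
  ∀ j, j < reqs.length →
    ((∀ i, i < j → pvHasKey input (reqs[i]!) = true ∧ pvHasTrue input (reqs[i]!) = true) →
      pvHasKey input (reqs[j]!) = true)
instance (input : List (List (String × Bool))) (reqs : List String) : Decidable (Pre_solve_me input reqs) := by unfold Pre_solve_me; infer_instance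

def pvWitness_solve_me : (List (List (String × Bool))) × List String :=
  ([[("a", true)], [("a", false), ("b", true)]], ["a"])

def Spec_solve_me (input : List (List (String × Bool))) (reqs : List String) (out : Int) : Prop := out = solve_me_alt input reqs
instance (input : List (List (String × Bool))) (reqs : List String) (out : Int) : Decidable (Spec_solve_me input reqs out) := by unfold Spec_solve_me; infer_instance

-- ===== CLAIM (what is proved, stated in full; the proofs are below) =====
def Claim_equal_solve_me : Prop := ∀ (input : List (List (String × Bool))) (reqs : List String), Dom_solve_me input reqs → Pre_solve_me input reqs → Spec_solve_me input reqs (solve_me input reqs)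

-- ===== LEMMAS AND PROOFS =====

-- index of the first `true` (none if there is none)
def pvFt : List Bool → Option Int
  | [] => none
  | b :: rest => if b then some 0 else (pvFt rest).map (· + 1)

-- min on Option Int, none = +infinity
def pvOmin : Option Int → Option Int → Option Int
  | none, y => y
  | some x, none => some x
  | some x, some y => some (min x y)

-- closed description of A's distance array after both passes, with initial since = s
def pvSpecD : List Bool → Option Int → List (Option Int)
  | [], _ => []
  | b :: rest, s =>
    (if b then some 0 else pvOmin (s.map (· + 1)) ((pvFt rest).map (· + 1))) ::
      pvSpecD rest (if b then some 0 else s.map (· + 1))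

-- positions of the `true` entries, starting at index t
def pvTP : List Bool → Int → List Int
  | [], _ => []
  | b :: rest, t => if b then t :: pvTP rest (t + 1) else pvTP rest (t + 1)

theorem pvFwd_cons (b : Bool) (rest : List Bool) (s : Option Int) :
    pvFwd (b :: rest) s =
      (if b then some 0 else s.map (· + 1)) :: pvFwd rest (if b then some 0 else s.map (· + 1)) := by
  cases b <;> cases s <;> simp [pvFwd]

theorem pvBwd_spec (rl : List Bool) : ∀ (s : Option Int),
    pvBwd (rl.zip (pvFwd rl s)) = (pvSpecD rl s, pvFt rl) := by
  induction rl with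
  | nil => intro s; simp [pvFwd, pvBwd, pvSpecD, pvFt]
  | cons b rest ih =>
    intro s
    rw [pvFwd_cons]
    cases b with
    | true =>
      simp only [if_true, List.zip_cons_cons, pvBwd, ih]
      simp [pvSpecD, pvFt]
    | false =>
      simp only [Bool.false_eq_true, if_false, List.zip_cons_cons, pvBwd, ih]
      cases hft : pvFt rest with
      | none => cases s <;> simp [pvSpecD, pvFt, hft, pvOmin]
      | some k => cases s <;> simp [pvSpecD, pvFt, hft, pvOmin]

theorem pvSpecD_length : ∀ (rl : List Bool) (s : Option Int), (pvSpecD rl s).length = rl.length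
  | [], _ => rfl
  | _ :: rest, s => by simp [pvSpecD, pvSpecD_length rest]

theorem pvFt_nonneg (rl : List Bool) : ∀ (k : Int), pvFt rl = some k → 0 ≤ k := by
  induction rl with
  | nil => simp [pvFt]
  | cons b rest ih =>
    intro k
    cases b <;> simp only [pvFt, if_true, Bool.false_eq_true, if_false]
    · cases hft : pvFt rest with
      | none => simp
      | some m => have := ih m hft; simp only [Option.map_some]; intro h; injection h with h; omega
    · intro h; injection h with h; omega

theorem pvTP_nonneg (rl : List Bool) : ∀ (t : Int), ∀ p ∈ pvTP rl t, t ≤ p := by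
  induction rl with
  | nil => intro t; simp [pvTP]
  | cons b rest ih =>
    intro t p hp
    have ih' := ih (t + 1)
    cases b <;> simp only [pvTP, if_true, Bool.false_eq_true, if_false, List.mem_cons] at hp
    · have := ih' p hp; omega
    · rcases hp with h | h
      · omega
      · have := ih' p h; omega

theorem pvTP_shift (rl : List Bool) : ∀ (t : Int), pvTP rl t = (pvTP rl 0).map (· + t) := by
  induction rl with
  | nil => intro t; simp [pvTP]
  | cons b rest ih =>
    intro t
    rw [show (0 : Int) = 0 from rfl]
    cases b <;>
      simp only [pvTP, if_true, Bool.false_eq_true, if_false, ih (t + 1), ih 1,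
        List.map_map, List.map_cons, zero_add]
    · exact List.map_congr_left (fun p _ => by simp; omega)
    · congr 1
      exact List.map_congr_left (fun p _ => by simp; omega)

theorem pvTP_eq_nil_iff : ∀ (rl : List Bool) (t : Int), pvTP rl t = [] ↔ pvFt rl = none
  | [], t => by simp [pvTP, pvFt]
  | b :: rest, t => by
    cases b <;> simp [pvTP, pvFt, pvTP_eq_nil_iff rest (t + 1)]

theorem pvPosB_eq (input : List (List (String × Bool))) (req : String) :
    pvPosB input req = pvTP (input.map (fun block => pvLookup block req)) 0 := by
  suffices h : ∀ (inp : List (List (String × Bool))) (t : Int),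
      (PySem.List.enumerate inp t).filterMap
        (fun p => if pvLookup p.2 req then some p.1 else none) =
      pvTP (inp.map (fun block => pvLookup block req)) t by
    exact h input 0
  intro inp
  induction inp with
  | nil => intro t; simp [PySem.List.enumerate, pvTP]
  | cons blk rest ih =>
    intro t
    rw [PySem.List.enumerate_cons]
    cases hb : pvLookup blk req <;> simp [hb, pvTP, ih]

theorem pvFoldlMin_comm : ∀ (t : List Int) (x y : Int),
    List.foldl min (min x y) t = min x (List.foldl min y t) := by
  intro t
  induction t with
  | nil => intro x y; rfl
  | cons z t ih =>
    intro x y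
    simp only [List.foldl_cons]
    rw [min_assoc, ih]

-- min of a nonempty list, cons form, as pvOmin
theorem pvMin_cons (x : Int) (l : List Int) :
    PySem.List.min? (x :: l) (fun y => y) = pvOmin (some x) (PySem.List.min? l (fun y => y)) := by
  cases l with
  | nil => simp [pvOmin, PySem.List.min?]
  | cons y t =>
    rw [PySem.List.min?_id_cons, PySem.List.min?_id_cons]
    simp only [pvOmin, List.foldl_cons]
    rw [pvFoldlMin_comm]

-- min over the true positions shifted by c is (first true) + c
theorem pvTP_min : ∀ (rl : List Bool) (c : Int),
    PySem.List.min? ((pvTP rl 0).map (fun p => p + c)) (fun y => y) =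
      (pvFt rl).map (fun x => x + c)
  | [], c => by simp [pvTP, pvFt, PySem.List.min?]
  | b :: rest, c => by
    have hsh := pvTP_shift rest 1
    have ih := pvTP_min rest (c + 1)
    have hmap : (pvTP rest 1).map (fun p => p + c) = (pvTP rest 0).map (fun p => p + (c + 1)) := by
      rw [hsh, List.map_map]; exact List.map_congr_left (fun p _ => by simp; omega)
    cases b with
    | false =>
      simp only [pvTP, pvFt, Bool.false_eq_true, if_false, zero_add]
      rw [hmap, ih]
      cases pvFt rest <;> simp; omega
    | true =>
      simp only [pvTP, pvFt, if_true, zero_add]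
      rw [List.map_cons, pvMin_cons, hmap, ih]
      have hnn := pvFt_nonneg rest
      cases hft : pvFt rest with
      | none => simp [pvOmin]
      | some k =>
        have := hnn k hft
        simp [pvOmin]
        omega

-- the central pointwise fact: A's distance-array entry i equals
-- min(s + i + 1, min over the true positions p of |i - p|)
theorem pvSC (rl : List Bool) : ∀ (s : Option Int), (∀ x ∈ s, 0 ≤ x) →
    ∀ (i : Nat) (hi : i < rl.length),
    (pvSpecD rl s)[i]'(by rw [pvSpecD_length]; exact hi) =
      pvOmin (s.map (fun x => x + ((i : Int) + 1)))
        (PySem.List.min? ((pvTP rl 0).map (fun p => (((i : Int) - p).natAbs : Int))) (fun y => y)) := by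
  induction rl with
  | nil => intro s hs i hi; simp at hi
  | cons b rest ih =>
    intro s hs i hi
    match i with
    | 0 =>
      simp only [Nat.cast_zero, zero_sub]
      cases b with
      | false =>
        have hmap : (pvTP (false :: rest) 0).map (fun p => (((-p : Int)).natAbs : Int)) =
            (pvTP rest 0).map (fun p => p + 1) := by
          simp only [pvTP, Bool.false_eq_true, if_false, zero_add, pvTP_shift rest 1,
            List.map_map]
          refine List.map_congr_left (fun p hp => ?_)
          have := pvTP_nonneg rest 0 p hp
          simp only [Function.comp_apply]
          omega
        simp only [pvSpecD, Bool.false_eq_true, if_false, List.getElem_cons_zero, hmap,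
          pvTP_min rest 1]
        norm_num
      | true =>
        have hmap : (pvTP (true :: rest) 0).map (fun p => (((-p : Int)).natAbs : Int)) =
            0 :: (pvTP rest 0).map (fun p => p + 1) := by
          simp only [pvTP, if_true, zero_add, pvTP_shift rest 1, List.map_map, List.map_cons]
          refine congrArg₂ List.cons (by simp) (List.map_congr_left (fun p hp => ?_))
          have := pvTP_nonneg rest 0 p hp
          simp only [Function.comp_apply]
          omega
        simp only [pvSpecD, if_true, List.getElem_cons_zero, hmap, pvMin_cons, pvTP_min rest 1]
        cases hft : pvFt rest with
        | none =>
          cases s with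
          | none => simp [pvOmin]
          | some x =>
            have hx := hs x (by simp)
            simp only [Option.map_some, Option.map_none, pvOmin, Option.some.injEq]
            omega
        | some k =>
          have hk := pvFt_nonneg rest k hft
          cases s with
          | none =>
            simp only [Option.map_none, Option.map_some, pvOmin, Option.some.injEq]
            omega
          | some x =>
            have hx := hs x (by simp)
            simp only [Option.map_some, pvOmin, Option.some.injEq]
            omega
    | j + 1 =>
      have hj : j < rest.length := by simpa using Nat.lt_of_succ_lt_succ hi
      have hcast : ((j + 1 : Nat) : Int) = (j : Int) + 1 := by push_cast; ring
      have hmap2 : (pvTP rest 1).map (fun p => ((((j : Int) + 1) - p).natAbs : Int)) =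
          (pvTP rest 0).map (fun p => (((j : Int) - p).natAbs : Int)) := by
        rw [pvTP_shift rest 1, List.map_map]
        refine List.map_congr_left (fun p hp => ?_)
        simp only [Function.comp_apply]
        omega
      cases b with
      | false =>
        have hs' : ∀ x ∈ s.map (· + 1), (0 : Int) ≤ x := by
          cases s with
          | none => simp
          | some x => have := hs x (by simp); simp; omega
        have hLHS : (pvSpecD (false :: rest) s)[j + 1]'(by rw [pvSpecD_length]; exact hi) =
            (pvSpecD rest (s.map (· + 1)))[j]'(by rw [pvSpecD_length]; exact hj) := by
          simp [pvSpecD]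
        rw [hLHS, ih _ hs' j hj]
        simp only [pvTP, Bool.false_eq_true, if_false, zero_add, hcast, hmap2]
        cases s with
        | none => simp
        | some x =>
          simp only [Option.map_some]
          congr 2
          ring
      | true =>
        have hLHS : (pvSpecD (true :: rest) s)[j + 1]'(by rw [pvSpecD_length]; exact hi) =
            (pvSpecD rest (some 0))[j]'(by rw [pvSpecD_length]; exact hj) := by
          simp [pvSpecD]
        rw [hLHS, ih (some 0) (by simp) j hj]
        simp only [pvTP, if_true, zero_add, List.map_cons, hcast, hmap2, pvMin_cons,
          Option.map_some]
        have h0 : ((((j : Int) + 1) - 0).natAbs : Int) = (j : Int) + 1 := by omega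
        rw [h0]
        cases hM : PySem.List.min? ((pvTP rest 0).map (fun p => (((j : Int) - p).natAbs : Int)))
            (fun y => y) with
        | none =>
          cases s with
          | none => simp [pvOmin]
          | some x =>
            have hx := hs x (by simp)
            simp only [Option.map_some, pvOmin, Option.some.injEq]
            omega
        | some m =>
          cases s with
          | none => simp [pvOmin]
          | some x =>
            have hx := hs x (by simp)
            simp only [Option.map_some, pvOmin, Option.some.injEq]
            omega

theorem pvOmin_isSome_left (a : Int) (y : Option Int) : (pvOmin (some a) y).isSome := by
  cases y <;> simp [pvOmin]

theorem pvOmin_isSome_right (x : Option Int) (a : Int) : (pvOmin x (some a)).isSome := by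
  cases x <;> simp [pvOmin]

-- every entry of the distance array is some when a true exists (or a left seed is given)
theorem pvSpecD_isSome (rl : List Bool) : ∀ (s : Option Int),
    ((pvFt rl).isSome ∨ s.isSome) → ∀ d ∈ pvSpecD rl s, d.isSome := by
  induction rl with
  | nil => intro s _ d hd; simp [pvSpecD] at hd
  | cons b rest ih =>
    intro s hor d hd
    cases b with
    | true =>
      simp only [pvSpecD, if_true, List.mem_cons] at hd
      rcases hd with h | h
      · simp [h]
      · exact ih (some 0) (Or.inr rfl) d h
    | false =>
      have hor' : (pvFt rest).isSome ∨ (s.map (· + 1)).isSome := by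
        rcases hor with h | h
        · left
          simp only [pvFt, Bool.false_eq_true, if_false] at h
          cases hft : pvFt rest with
          | none => rw [hft] at h; simp at h
          | some k => simp
        · right
          cases s with
          | none => simp at h
          | some x => simp
      simp only [pvSpecD, Bool.false_eq_true, if_false, List.mem_cons] at hd
      rcases hd with h | h
      · subst h
        rcases hor' with h | h
        · obtain ⟨k, hk⟩ := Option.isSome_iff_exists.mp h
          rw [hk, Option.map_some]
          exact pvOmin_isSome_right _ _
        · obtain ⟨x, hx⟩ := Option.isSome_iff_exists.mp h
          rw [hx]
          exact pvOmin_isSome_left _ _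
      · exact ih _ hor' d h

theorem pvContains_false (rl : List Bool) (k : Int) (hft : pvFt rl = some k) :
    (pvSpecD rl none).contains none = false := by
  have h := pvSpecD_isSome rl none (Or.inl (by simp [hft]))
  simp only [List.contains_eq_mem, decide_eq_false_iff_not]
  intro hmem
  exact absurd (h none hmem) (by simp)

theorem pvContains_true (b : Bool) (rest : List Bool) (hft : pvFt (b :: rest) = none) :
    (pvSpecD (b :: rest) none).contains none = true := by
  have hb : b = false := by
    cases b
    · rfl
    · simp [pvFt] at hft
  subst hb
  simp only [pvFt, Bool.false_eq_true, if_false, Option.map_eq_none_iff] at hft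
  simp [pvSpecD, hft, pvOmin]

-- the two per-requirement updates coincide
theorem pvStep_eq (rl : List Bool) (best : List Int) (hlen : best.length = rl.length)
    (k : Int) (hft : pvFt rl = some k) :
    (PySem.List.enumerate best 0).map (fun p => max p.2 (pvMinDist (pvTP rl 0) p.1)) =
      List.zipWith (fun d m => max (d.getD 0) m) (pvSpecD rl none) best := by
  refine List.ext_getElem (by simp [pvSpecD_length, hlen]) ?_
  intro i h1 h2
  have hib : i < best.length := by simpa using h1
  have hirl : i < rl.length := by rw [← hlen]; exact hib
  rw [List.getElem_map, PySem.List.getElem_enumerate, List.getElem_zipWith]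
  have hspec := pvSC rl none (by simp) i hirl
  simp only [Option.map_none, pvOmin] at hspec
  have hpos : pvTP rl 0 ≠ [] := by
    rw [Ne, pvTP_eq_nil_iff rl 0, hft]; simp
  have hsome : (PySem.List.min?
      ((pvTP rl 0).map (fun p => (((i : Int) - p).natAbs : Int))) (fun y => y)).isSome := by
    rw [Option.isSome_iff_ne_none, Ne, PySem.List.min?_eq_none_iff]
    simp [hpos]
  obtain ⟨m, hm⟩ := Option.isSome_iff_exists.mp hsome
  simp only [pvMinDist, zero_add, hm, hspec, Option.getD_some]
  exact max_comm _ _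

theorem pvFoldlMin_le (l : List Int) : ∀ (a : Int), l.foldl min a ≤ a := by
  induction l with
  | nil => intro a; simp
  | cons x t ih =>
    intro a
    simp only [List.foldl_cons]
    exact le_trans (ih (min a x)) (min_le_left a x)

theorem pvFoldlMin_mem (l : List Int) : ∀ (a : Int), l.foldl min a = a ∨ l.foldl min a ∈ l := by
  induction l with
  | nil => intro a; simp
  | cons x t ih =>
    intro a
    simp only [List.foldl_cons, pvFoldlMin_comm, List.mem_cons]
    rcases min_cases a (t.foldl min x) with ⟨h, _⟩ | ⟨h, _⟩
    · left; exact h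
    · right
      rw [h]
      rcases ih x with h2 | h2
      · left; exact h2.symm ▸ rfl
      · right; exact h2

-- Python's argmin loop computes the first index of the minimum
theorem pvArgmin_eq : ∀ (rest : List Int) (v besti i : Int),
    pvArgmin rest v besti i =
      if rest.foldl min v < v then
        i + (((List.idxOf? (rest.foldl min v) rest).getD 0 : Nat) : Int)
      else besti := by
  intro rest
  induction rest with
  | nil => intro v besti i; simp [pvArgmin]
  | cons x t ih =>
    intro v besti i
    simp only [pvArgmin, List.foldl_cons]
    by_cases hvx : v > x
    · rw [if_pos hvx, ih, min_eq_right (le_of_lt hvx)]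
      have hle := pvFoldlMin_le t x
      have hcond : t.foldl min x < v := lt_of_le_of_lt hle hvx
      rw [if_pos hcond]
      by_cases h2 : t.foldl min x < x
      · rw [if_pos h2]
        have hne : (x == t.foldl min x) = false := by simp; omega
        rw [List.idxOf?_cons, hne]
        have hmem : t.foldl min x ∈ t := by
          rcases pvFoldlMin_mem t x with h | h
          · omega
          · exact h
        have hsome : (List.idxOf? (t.foldl min x) t).isSome := by
          rw [Option.isSome_iff_ne_none, Ne, List.idxOf?_eq_none_iff]
          simp [hmem]
        obtain ⟨j, hj⟩ := Option.isSome_iff_exists.mp hsome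
        simp only [hj, Bool.false_eq_true, if_false, Option.map_some, Option.getD_some]
        push_cast
        ring
      · rw [if_neg h2]
        have hx : t.foldl min x = x := le_antisymm hle (by omega)
        rw [hx, List.idxOf?_cons]
        simp
    · rw [if_neg hvx, ih, min_eq_left (by omega)]
      by_cases h2 : t.foldl min v < v
      · rw [if_pos h2, if_pos h2]
        have hne : (x == t.foldl min v) = false := by simp; omega
        rw [List.idxOf?_cons, hne]
        have hmem : t.foldl min v ∈ t := by
          rcases pvFoldlMin_mem t v with h | h
          · omega
          · exact h
        have hsome : (List.idxOf? (t.foldl min v) t).isSome := by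
          rw [Option.isSome_iff_ne_none, Ne, List.idxOf?_eq_none_iff]
          simp [hmem]
        obtain ⟨j, hj⟩ := Option.isSome_iff_exists.mp hsome
        simp only [hj, Bool.false_eq_true, if_false, Option.map_some, Option.getD_some]
        push_cast
        ring
      · rw [if_neg h2, if_neg h2]

-- the main loop invariant: with equal accumulators of the right length, A's loop = B's loop
theorem pvGo_eq (input : List (List (String × Bool))) :
    ∀ (reqs : List String) (best : List Int), best.length = input.length →
      pvGoA input reqs best = pvGoB input reqs best := by
  intro reqs
  induction reqs with
  | nil =>
    intro best hlen
    cases best with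
    | nil => simp [pvGoA, pvGoB]
    | cons v rest =>
      simp only [pvGoA, pvGoB, if_neg (List.cons_ne_nil v rest)]
      rw [PySem.List.min?_id_cons, Option.getD_some, PySem.List.index?_eq_idxOf?, pvArgmin_eq]
      by_cases hm : rest.foldl min v < v
      · rw [if_pos hm]
        have hne : (v == rest.foldl min v) = false := by simp; omega
        rw [List.idxOf?_cons, hne]
        have hmem : rest.foldl min v ∈ rest := by
          rcases pvFoldlMin_mem rest v with h | h
          · omega
          · exact h
        have hsome : (List.idxOf? (rest.foldl min v) rest).isSome := by
          rw [Option.isSome_iff_ne_none, Ne, List.idxOf?_eq_none_iff]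
          simp [hmem]
        obtain ⟨j, hj⟩ := Option.isSome_iff_exists.mp hsome
        simp only [hj, Bool.false_eq_true, if_false, Option.map_some, Option.getD_some]
        push_cast
        ring
      · rw [if_neg hm]
        have hv : rest.foldl min v = v := le_antisymm (pvFoldlMin_le rest v) (by omega)
        rw [hv, List.idxOf?_cons]
        simp
  | cons req rest ih =>
    intro best hlen
    simp only [pvGoA, pvGoB, pvDist, pvBwd_spec, pvPosB_eq]
    cases hft : pvFt (input.map (fun block => pvLookup block req)) with
    | some k =>
      have hlen2 : best.length = (input.map (fun block => pvLookup block req)).length := by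
        simp [hlen]
      have hpos : (pvTP (input.map (fun block => pvLookup block req)) 0).isEmpty = false := by
        rw [List.isEmpty_eq_false_iff, Ne, pvTP_eq_nil_iff, hft]
        simp
      rw [pvContains_false _ k hft, if_neg (by simp), hpos, Bool.and_false, if_neg (by simp)]
      rw [← pvStep_eq _ best hlen2 k hft]
      refine ih _ ?_
      simp [hlen]
    | none =>
      cases hinp : input.map (fun block => pvLookup block req) with
      | nil =>
        have hinpnil : input = [] := by
          cases input with
          | nil => rfl
          | cons _ _ => simp at hinp
        subst hinpnil
        have hbest : best = [] := List.length_eq_zero_iff.mp (by simpa using hlen)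
        subst hbest
        simp only [List.map_nil, pvSpecD, List.contains_nil, Bool.false_eq_true, if_false,
          List.isEmpty_nil, Bool.not_true, Bool.false_and, List.zipWith_nil_left,
          PySem.List.enumerate]
        exact ih [] rfl
      | cons b rest2 =>
        have hinpne : input ≠ [] := by
          intro h
          subst h
          simp at hinp
        rw [hinp] at hft
        have hc := pvContains_true b rest2 hft
        rw [hc]
        have hpos : (pvTP (b :: rest2) 0).isEmpty = true := by
          rw [List.isEmpty_iff, pvTP_eq_nil_iff]
          exact hft
        rw [hpos]
        have hie : input.isEmpty = false := by
          rw [List.isEmpty_eq_false_iff]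
          exact hinpne
        rw [hie]
        simp

-- ===== VERDICT (by name: the statement is the Claim_ definition above) =====
theorem solve_me_spec : Claim_equal_solve_me := by
  intro input reqs _ _
  unfold Spec_solve_me solve_me solve_me_alt
  exact pvGo_eq input reqs _ (by simp)
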